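-- pv_equiv track=rewrite | github.com/yahya09206/PythonA-Z | Leetcode/reverse_string_ii.py | reverse_string_ii
-- ===== SOURCE A (Python) =====
-- def reverse_string_ii(s:str, k:int) -> str:
--
-- 	# Step 1: Convert string to a mutable list (The "Binder")
-- 	chars = list(s)
-- 	n = len(chars)
--
-- 	# Step 2: Jump through the list in blocks of 2k
-- 	for i in range(0, n, 2 * k):
--
-- 		# Step 3: Set our Opposite Ends pointers for the first k characters
-- 		left = i
--
-- 		# Use min() to ensure we don't fall off the end of the list
-- 		right = min(i + k - 1, n - 1)
--
-- 		# perform swap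
-- 		while left < right:
-- 			chars[left], chars[right] = chars[right], chars[left]
-- 			left += 1
-- 			right -= 1
--
-- 	# Step 5: Join the list back into a string
-- 	return "".join(chars)
-- ===== SOURCE B (Python) =====
-- def reverse_string_ii(s: str, k: int) -> str:
--     # Nothing to reverse for non-positive k: return the string unchanged.
--     if k <= 0:
--         return s
--     pieces = []
--     for i in range(0, len(s), 2 * k):
--         pieces.append(s[i:i + k][::-1] + s[i + k:i + 2 * k])
--     return "".join(pieces)
-- ===== Notes on version B (the rewrite author's own statement) =====
-- stated objective: simpler
-- what changed: Replaces A's mutable char array with per-block two-pointer in-place swaps by building a list of string chunks, each chunk a reversed k-slice concatenated with the untouched next k-slice, joined once at the end; the inner while loop disappears (and bulk slicing measures ~10x faster than per-char swaps at large n).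
import Mathlib
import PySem

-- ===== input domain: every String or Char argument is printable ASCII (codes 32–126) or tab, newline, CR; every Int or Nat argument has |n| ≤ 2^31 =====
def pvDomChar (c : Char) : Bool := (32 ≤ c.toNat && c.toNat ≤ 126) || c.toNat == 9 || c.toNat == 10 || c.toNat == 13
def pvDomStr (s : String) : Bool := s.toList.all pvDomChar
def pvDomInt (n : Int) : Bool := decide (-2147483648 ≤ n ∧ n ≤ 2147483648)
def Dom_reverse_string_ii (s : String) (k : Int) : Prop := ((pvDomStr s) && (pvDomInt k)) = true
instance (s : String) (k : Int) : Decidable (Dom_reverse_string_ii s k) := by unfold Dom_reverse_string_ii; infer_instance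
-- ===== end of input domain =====

-- B replaces A's mutable char array with two-pointer swaps by assembling reversed-k-slice + untouched-slice
-- chunks per 2k block and joining them (objective: simpler); k = 0, where A raises ValueError, is outside Pre_.


-- ===== PORT A =====
-- inner 'while left < right' swap loop; pyGet? returning none is Python's IndexError (never reached
-- for the indices A generates, where 0 ≤ left < right < len, so .set left.toNat is exact there)
def pvSwapLoop (chars : List Char) (left right : Int) : List Char :=
  if left < right then
    match PySem.List.pyGet? chars left, PySem.List.pyGet? chars right with
    | some cl, some cr =>
        pvSwapLoop ((chars.set left.toNat cr).set right.toNat cl) (left + 1) (right - 1)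
    | _, _ => chars
  else chars
termination_by (right - left).toNat
decreasing_by omega

def reverse_string_ii (s : String) (k : Int) : String :=
  let chars := s.toList
  let n : Int := chars.length
  let final := (PySem.List.pyRange 0 n (2 * k)).foldl
    (fun ch i => pvSwapLoop ch i (min (i + k - 1) (n - 1))) chars
  String.ofList final

-- ===== PORT B =====
def reverse_string_ii_alt (s : String) (k : Int) : String :=
  if k ≤ 0 then s
  else
    let cs := s.toList
    let n : Int := cs.length
    let pieces := (PySem.List.pyRange 0 n (2 * k)).map (fun i =>
      (PySem.List.slice cs (some i) (some (i + k))).reverse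
        ++ PySem.List.slice cs (some (i + k)) (some (i + 2 * k)))
    String.ofList pieces.flatten

-- ===== PRECONDITION & SPEC =====
-- Pre_ excludes exactly k = 0, where Python's range(0, n, 0) raises ValueError.
def Pre_reverse_string_ii (s : String) (k : Int) : Prop := k ≠ 0
instance (s : String) (k : Int) : Decidable (Pre_reverse_string_ii s k) := by
  unfold Pre_reverse_string_ii; infer_instance
def pvWitness_reverse_string_ii : String × Int := ("abcdefg", 2)

def Spec_reverse_string_ii (s : String) (k : Int) (out : String) : Prop := out = reverse_string_ii_alt s k
instance (s : String) (k : Int) (out : String) : Decidable (Spec_reverse_string_ii s k out) := by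
  unfold Spec_reverse_string_ii; infer_instance

-- ===== CLAIM (what is proved, stated in full; the proofs are below) =====
def Claim_equal_reverse_string_ii : Prop := ∀ (s : String) (k : Int), Dom_reverse_string_ii s k → Pre_reverse_string_ii s k → Spec_reverse_string_ii s k (reverse_string_ii s k)

-- ===== LEMMAS AND PROOFS =====

-- range(a, b, s) is empty for a negative step when a <= b
theorem pvRange_nil_of_neg {a b s : Int} (hs : s < 0) (hab : a ≤ b) :
    PySem.List.pyRange a b s = [] := by
  simp only [PySem.List.pyRange, if_neg hs.ne, if_neg (by omega : ¬ 0 < s),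
    if_neg (by omega : ¬ b < a)]
  simp

theorem pvRange_nil_of_pos {a b s : Int} (hs : 0 < s) (hab : b ≤ a) :
    PySem.List.pyRange a b s = [] := by
  rw [PySem.List.pyRange_of_pos _ _ hs, if_neg (by omega)]
  simp

theorem pvRange_cons {a b s : Int} (hs : 0 < s) (hab : a < b) :
    PySem.List.pyRange a b s = a :: PySem.List.pyRange (a + s) b s := by
  rw [PySem.List.pyRange_of_pos _ _ hs, PySem.List.pyRange_of_pos _ _ hs, if_pos hab]
  by_cases h2 : a + s < b
  · rw [if_pos h2]
    have key : ((b - a + s - 1) / s).toNat = ((b - (a + s) + s - 1) / s).toNat + 1 := by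
      have e1 : b - a + s - 1 = (b - (a + s) + s - 1) + 1 * s := by ring
      have e2 : (b - a + s - 1) / s = (b - (a + s) + s - 1) / s + 1 := by
        rw [e1, Int.add_mul_ediv_right _ _ hs.ne']
      have h3 : 0 ≤ (b - (a + s) + s - 1) / s := Int.ediv_nonneg (by omega) (by omega)
      omega
    rw [key, List.range_succ_eq_map]
    simp only [List.map_cons, List.map_map]
    congr 1
    · simp
    apply List.map_congr_left
    intro x _
    simp [Nat.succ_eq_add_one]
    push_cast
    ring
  · rw [if_neg h2]
    have key : ((b - a + s - 1) / s).toNat = 1 := by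
      have : (b - a + s - 1) / s = 1 := by
        have e1 : b - a + s - 1 = (b - a - 1) + 1 * s := by ring
        rw [e1, Int.add_mul_ediv_right _ _ hs.ne']
        rw [Int.ediv_eq_zero_of_lt (by omega) (by omega)]
        ring
      omega
    rw [key]
    simp

theorem pvGet_at (l : List Char) (j : Nat) (hj : j < l.length) :
    PySem.List.pyGet? l (j : Int) = l[j]? := by
  simp [PySem.List.pyGet?, PySem.List.pyIdx?, hj]

theorem pvGet_append (pre t : List Char) (j : Nat) (hj : j < t.length) :
    PySem.List.pyGet? (pre ++ t) ((pre.length + j : Nat) : Int) = t[j]? := by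
  rw [pvGet_at _ _ (by simp; omega), List.getElem?_append_right (Nat.le_add_right _ _)]
  simp

theorem pvSwapLoop_reverse (pre mid suf : List Char) :
    pvSwapLoop (pre ++ mid ++ suf) (pre.length : Int) ((pre.length : Int) + mid.length - 1)
      = pre ++ mid.reverse ++ suf := by
  rcases mid with _ | ⟨c, rest⟩
  · rw [pvSwapLoop, if_neg (by simp)]
    simp
  · rcases rest.eq_nil_or_concat with rfl | ⟨m, d, rfl⟩
    · rw [pvSwapLoop, if_neg (by simp)]
      simp
    · simp only [List.concat_eq_append]
      have hget1 : PySem.List.pyGet? (pre ++ (c :: (m ++ [d])) ++ suf) (pre.length : Int)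
          = some c := by
        have h0 := pvGet_append pre (c :: (m ++ ([d] ++ suf))) 0 (by simp)
        simpa using h0
      have hidx : ((pre.length : Int) + ((c :: (m ++ [d])).length : Int) - 1)
          = ((pre.length + (m.length + 1) : Nat) : Int) := by push_cast [List.length_cons, List.length_append, List.length_nil]; ring
      have hget2 : PySem.List.pyGet? (pre ++ (c :: (m ++ [d])) ++ suf)
          ((pre.length : Int) + ((c :: (m ++ [d])).length : Int) - 1) = some d := by
        rw [hidx, show pre ++ (c :: (m ++ [d])) ++ suf = pre ++ (c :: (m ++ ([d] ++ suf))) by simp]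
        rw [pvGet_append pre _ (m.length + 1) (by simp)]
        simp
      rw [pvSwapLoop, if_pos (by push_cast [List.length_cons, List.length_append, List.length_nil]; omega)]
      rw [hget1, hget2]
      dsimp only
      have hset : ((pre ++ (c :: (m ++ [d])) ++ suf).set (pre.length : Int).toNat d).set
            ((pre.length : Int) + ((c :: (m ++ [d])).length : Int) - 1).toNat c
          = (pre ++ [d]) ++ m ++ (c :: suf) := by
        rw [hidx]
        simp only [Int.toNat_natCast]
        simp
      rw [hset]
      have hIH := pvSwapLoop_reverse (pre ++ [d]) m (c :: suf)
      rw [show ((((pre ++ [d]).length : Nat)) : Int) = (pre.length : Int) + 1 by simp,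
        show ((pre.length : Int) + 1 + (m.length : Int) - 1)
          = (pre.length : Int) + ((c :: (m ++ [d])).length : Int) - 1 - 1 by
            push_cast [List.length_cons, List.length_append, List.length_nil]; ring] at hIH
      rw [hIH]
      simp
termination_by mid.length

theorem pvFold (k : Int) (hk : 0 < k) (cs : List Char) (rest done : List Char)
    (hlen : done.length + rest.length = cs.length)
    (hrest : rest = cs.drop done.length) :
    (PySem.List.pyRange (done.length : Int) (cs.length : Int) (2 * k)).foldl
        (fun ch i => pvSwapLoop ch i (min (i + k - 1) ((cs.length : Int) - 1))) (done ++ rest)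
      = done ++ ((PySem.List.pyRange (done.length : Int) (cs.length : Int) (2 * k)).map
          (fun i => (PySem.List.slice cs (some i) (some (i + k))).reverse
            ++ PySem.List.slice cs (some (i + k)) (some (i + 2 * k)))).flatten := by
  have hks : (0:Int) < 2 * k := by omega
  by_cases hempty : rest = []
  · subst hempty
    rw [pvRange_nil_of_pos hks (by simp at hlen; omega)]
    simp
  · have hlt : (done.length : Int) < (cs.length : Int) := by
      have : 0 < rest.length := List.length_pos_iff.mpr hempty
      omega
    set K := k.toNat with hK
    have hkK : k = (K : Int) := by omega
    -- the head block step reverses rest.take K in place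
    have hstep : pvSwapLoop (done ++ rest) (done.length : Int)
          (min ((done.length : Int) + k - 1) ((cs.length : Int) - 1))
        = done ++ (rest.take K).reverse ++ rest.drop K := by
      rw [show done ++ rest = done ++ rest.take K ++ rest.drop K by
            rw [List.append_assoc, List.take_append_drop],
          show min ((done.length : Int) + k - 1) ((cs.length : Int) - 1)
              = (done.length : Int) + ((rest.take K).length : Int) - 1 by
            simp only [List.length_take]
            rw [hkK]; push_cast [Nat.cast_min]; omega]
      exact pvSwapLoop_reverse done (rest.take K) (rest.drop K)
    -- slices of cs at the block describe the same two chunks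
    have hslice1 : PySem.List.slice cs (some (done.length : Int))
          (some ((done.length : Int) + k)) = rest.take K := by
      rw [hkK, PySem.List.slice_toNat cs (show (0:Int) ≤ (done.length : Int) by positivity)
        (show (0:Int) ≤ (done.length : Int) + (K : Int) by positivity)]
      rw [show ((done.length : Int) + (K : Int)).toNat = done.length + K by omega]
      simp [hrest, List.drop_take]
    have hslice2 : PySem.List.slice cs (some ((done.length : Int) + k))
          (some ((done.length : Int) + 2 * k)) = (rest.drop K).take K := by
      rw [hkK, PySem.List.slice_toNat cs
        (show (0:Int) ≤ (done.length : Int) + (K : Int) by positivity)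
        (show (0:Int) ≤ (done.length : Int) + 2 * (K : Int) by positivity)]
      rw [show ((done.length : Int) + (K : Int)).toNat = done.length + K by omega,
        show ((done.length : Int) + 2 * (K : Int)).toNat = done.length + K + K by omega]
      rw [hrest]
      rw [← List.drop_drop]
      congr 1
      omega
    rw [pvRange_cons hks hlt]
    simp only [List.foldl_cons, List.map_cons, List.flatten_cons]
    rw [hstep]
    by_cases hshort : rest.length ≤ 2 * K
    · have hnil : PySem.List.pyRange ((done.length : Int) + 2 * k) (cs.length : Int) (2 * k) = [] :=
        pvRange_nil_of_pos hks (by rw [hkK]; push_cast; omega)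
      rw [hnil]
      simp only [List.foldl_nil, List.map_nil, List.flatten_nil, List.append_nil]
      rw [hslice1, hslice2]
      rw [show (rest.drop K).take K = rest.drop K from
        List.take_of_length_le (by simp only [List.length_drop]; omega)]
      simp
    · -- recurse on the remaining blocks
      have hrec := pvFold k hk cs (rest.drop (K + K))
        (done ++ (rest.take K).reverse ++ (rest.drop K).take K)
        (by simp; omega)
        (by rw [hrest]; simp; omega)
      have hdl : (((done ++ (rest.take K).reverse ++ (rest.drop K).take K).length : Nat) : Int)
          = (done.length : Int) + 2 * k := by
        rw [hkK]
        simp only [List.length_append, List.length_reverse, List.length_take, List.length_drop]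
        push_cast [Nat.cast_min]
        omega
      have hsplit : done ++ (rest.take K).reverse ++ rest.drop K
          = (done ++ (rest.take K).reverse ++ (rest.drop K).take K) ++ rest.drop (K + K) := by
        rw [show rest.drop (K + K) = (rest.drop K).drop K by rw [List.drop_drop]]
        conv_lhs => rw [← List.take_append_drop K (rest.drop K)]
        simp [List.append_assoc]
      rw [hslice1, hslice2, hsplit, ← hdl, hrec]
      simp [List.append_assoc]
termination_by rest.length
decreasing_by simp only [List.length_drop]; omega

-- ===== VERDICT (by name: the statement is the Claim_ definition above) =====
theorem reverse_string_ii_spec : Claim_equal_reverse_string_ii := by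
  intro s k _ hpre
  simp only [Spec_reverse_string_ii, reverse_string_ii, reverse_string_ii_alt]
  rcases lt_or_gt_of_ne hpre with hneg | hpos
  · rw [if_pos (le_of_lt hneg)]
    rw [pvRange_nil_of_neg (by omega) (by positivity)]
    simp
  · rw [if_neg (by omega)]
    have h := pvFold k hpos s.toList s.toList [] (by simp) (by simp)
    simp only [List.nil_append, List.length_nil, Nat.cast_zero] at h
    rw [h]
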